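-- pv_equiv track=rewrite | github.com/D1a0y1bb/CloverSec-CTF-Build-Dockerizer-skill | src/CloverSec-CTF-Build-Dockerizer/scripts/utils.py | _choose_profile_for_major
-- ===== SOURCE A (Python) =====
-- from typing import Any, Dict, List, Optional, Set, Tuple
--
-- def _choose_profile_for_major(major: int, mapping: Dict[int, str]) -> Optional[str]:
--     if major in mapping:
--         return mapping[major]
--     ordered = sorted(mapping.keys())
--     for value in ordered:
--         if major <= value:
--             return mapping[value]
--     return mapping[ordered[-1]] if ordered else None
-- ===== SOURCE B (Python) =====
-- def _choose_profile_for_major(major, mapping):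
--     candidates = [k for k in mapping if k >= major]
--     if candidates:
--         return mapping[min(candidates)]
--     if mapping:
--         return mapping[max(mapping)]
--     return None
-- ===== Notes on version B (the rewrite author's own statement) =====
-- stated objective: simpler
-- what changed: Replaces the membership fast-path plus sort-then-scan with one-pass min/max reductions: mapping[min of keys >= major] if any, else mapping[max key], else None.
import Mathlib
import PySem

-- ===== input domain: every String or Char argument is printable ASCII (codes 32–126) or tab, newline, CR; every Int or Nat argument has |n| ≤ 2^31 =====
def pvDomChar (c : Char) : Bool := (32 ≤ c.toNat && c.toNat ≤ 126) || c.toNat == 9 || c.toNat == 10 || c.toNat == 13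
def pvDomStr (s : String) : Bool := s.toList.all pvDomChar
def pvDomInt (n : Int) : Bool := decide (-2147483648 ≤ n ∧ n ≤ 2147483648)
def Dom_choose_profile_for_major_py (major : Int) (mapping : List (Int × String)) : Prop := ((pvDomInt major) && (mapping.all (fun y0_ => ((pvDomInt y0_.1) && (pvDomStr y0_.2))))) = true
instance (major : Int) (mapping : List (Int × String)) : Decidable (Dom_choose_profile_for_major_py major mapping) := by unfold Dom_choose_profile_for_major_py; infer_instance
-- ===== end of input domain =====

-- B replaces A's membership fast-path plus sort-then-scan by two one-pass reductions
-- (min of the keys ≥ major, else max of all keys); objective: simpler.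

-- dict lookup mapping[k] (first match; keys of a Python dict are unique under Pre_)
def pvGet (mapping : List (Int × String)) (k : Int) : Option String :=
  match mapping with
  | [] => none
  | (a, v) :: t => if a = k then some v else pvGet t k

-- ===== PORT A =====
def choose_profile_for_major_py (major : Int) (mapping : List (Int × String)) : Option String :=
  match pvGet mapping major with          -- if major in mapping: return mapping[major]
  | some v => some v
  | none =>
    let ordered := PySem.List.sorted (mapping.map Prod.fst) (fun x => x) false
    match ordered.find? (fun value => decide (major ≤ value)) with   -- the for loop
    | some value => pvGet mapping value
    | none =>                              -- mapping[ordered[-1]] if ordered else None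
      match ordered.getLast? with
      | some k => pvGet mapping k
      | none => none

-- ===== PORT B =====
def choose_profile_for_major_py_alt (major : Int) (mapping : List (Int × String)) : Option String :=
  let candidates := (mapping.map Prod.fst).filter (fun k => decide (major ≤ k))
  match PySem.List.min? candidates (fun x => x) with
  | some m => pvGet mapping m
  | none =>
    match PySem.List.max? (mapping.map Prod.fst) (fun x => x) with
    | some m => pvGet mapping m
    | none => none

-- ===== PRECONDITION & SPEC =====
-- Pre_ excludes association lists with duplicate keys: the argument is a Python dict,
-- whose keys are unique, so such lists do not correspond to any Python input.
def Pre_choose_profile_for_major_py (major : Int) (mapping : List (Int × String)) : Prop :=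
  (mapping.map Prod.fst).Nodup
instance (major : Int) (mapping : List (Int × String)) : Decidable (Pre_choose_profile_for_major_py major mapping) := by unfold Pre_choose_profile_for_major_py; infer_instance
def pvWitness_choose_profile_for_major_py : Int × (List (Int × String)) := (2, [(1, "a"), (3, "b")])
def Spec_choose_profile_for_major_py (major : Int) (mapping : List (Int × String)) (out : Option String) : Prop := out = choose_profile_for_major_py_alt major mapping
instance (major : Int) (mapping : List (Int × String)) (out : Option String) : Decidable (Spec_choose_profile_for_major_py major mapping out) := by unfold Spec_choose_profile_for_major_py; infer_instance

-- ===== CLAIM (what is proved, stated in full; the proofs are below) =====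
def Claim_equal_choose_profile_for_major_py : Prop := ∀ (major : Int) (mapping : List (Int × String)), Dom_choose_profile_for_major_py major mapping → Pre_choose_profile_for_major_py major mapping → Spec_choose_profile_for_major_py major mapping (choose_profile_for_major_py major mapping)

-- ===== LEMMAS AND PROOFS =====

-- pvGet finds a value exactly when the key occurs
theorem pvGet_isSome_iff_mem (mapping : List (Int × String)) (k : Int) :
    (pvGet mapping k).isSome ↔ k ∈ mapping.map Prod.fst := by
  induction mapping with
  | nil => simp [pvGet]
  | cons hd t ih =>
    obtain ⟨a, v⟩ := hd
    by_cases h : a = k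
    · subst h; simp [pvGet]
    · simp only [pvGet, if_neg h, List.map_cons, List.mem_cons]
      rw [ih]
      constructor
      · exact Or.inr
      · rintro (h' | h')
        · exact absurd h'.symm h
        · exact h'

-- on a ≤-sorted list, find? returns a minimum among the elements satisfying the predicate
theorem find?_min_of_pairwise {l : List Int} (hp : l.Pairwise (· ≤ ·)) {p : Int → Bool} {k : Int}
    (h : l.find? p = some k) : ∀ x ∈ l, p x = true → k ≤ x := by
  induction l with
  | nil => simp at h
  | cons a t ih =>
    rw [List.find?_cons] at h
    rcases List.pairwise_cons.mp hp with ⟨ha, ht⟩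
    by_cases hpa : p a = true
    · simp [hpa] at h
      subst h
      intro x hx _
      rcases List.mem_cons.mp hx with hx | hx
      · omega
      · exact ha x hx
    · simp [hpa] at h
      intro x hx hpx
      rcases List.mem_cons.mp hx with hx | hx
      · subst hx; exact absurd hpx hpa
      · exact ih ht h x hx hpx

-- on a ≤-sorted list, the last element bounds every element
theorem getLast?_max_of_pairwise {l : List Int} (hp : l.Pairwise (· ≤ ·)) {L : Int}
    (h : l.getLast? = some L) : ∀ x ∈ l, x ≤ L := by
  induction l with
  | nil => simp at h
  | cons a t ih =>
    rcases List.pairwise_cons.mp hp with ⟨ha, ht⟩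
    cases t with
    | nil =>
      simp at h
      subst h; simp
    | cons b u =>
      rw [List.getLast?_cons_cons] at h
      intro x hx
      rcases List.mem_cons.mp hx with hx | hx
      · subst hx
        have hb : L ∈ b :: u := List.mem_of_getLast? h
        exact le_trans (ha L hb) (le_refl L)
      · exact ih ht h x hx

theorem choose_eq (major : Int) (mapping : List (Int × String)) :
    choose_profile_for_major_py major mapping = choose_profile_for_major_py_alt major mapping := by
  unfold choose_profile_for_major_py choose_profile_for_major_py_alt
  set ks := mapping.map Prod.fst with hks
  set S := PySem.List.sorted ks (fun x => x) false with hS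
  have hperm : S.Perm ks := PySem.List.sorted_perm ks (fun x => x) false
  have hpw : S.Pairwise (· ≤ ·) := by
    simpa [hS] using PySem.List.sorted_pairwise ks (fun x => x)
  set cands := ks.filter (fun k => decide (major ≤ k)) with hc
  cases hg : pvGet mapping major with
  | some v =>
    -- major is a key, so it is the minimum candidate
    have hmem : major ∈ ks := (pvGet_isSome_iff_mem mapping major).mp (by simp [hg])
    have hmc : major ∈ cands := by
      simp [hc, List.mem_filter, hmem]
    cases hmin : PySem.List.min? cands (fun x => x) with
    | none =>
      exact absurd ((PySem.List.min?_eq_none_iff cands (fun x => x)).mp hmin ▸ hmc) (List.not_mem_nil)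
    | some m =>
      have h1 : m ≤ major := PySem.List.min?_isMin hmin major hmc
      have h2 : major ≤ m := by
        have hm' : m ∈ cands := PySem.List.min?_mem hmin
        have : decide (major ≤ m) = true := (List.mem_filter.mp hm').2
        simpa using this
      have hm : m = major := le_antisymm h1 h2
      simp only [hmin, hm]
      exact hg.symm
  | none =>
    have hnmem : major ∉ ks := by
      intro hmem
      have := (pvGet_isSome_iff_mem mapping major).mpr hmem
      simp [hg] at this
    cases hf : S.find? (fun value => decide (major ≤ value)) with
    | some k =>
      -- the first sorted key ≥ major is the minimum candidate
      have hkS : k ∈ S := List.mem_of_find?_eq_some hf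
      have hkmaj : major ≤ k := by
        have := List.find?_some hf
        simpa using this
      have hkc : k ∈ cands := by
        simp [hc, List.mem_filter, hperm.mem_iff.mp hkS, hkmaj]
      cases hmin : PySem.List.min? cands (fun x => x) with
      | none =>
        exact absurd ((PySem.List.min?_eq_none_iff cands (fun x => x)).mp hmin ▸ hkc) (List.not_mem_nil)
      | some m =>
        have hm' : m ∈ cands := PySem.List.min?_mem hmin
        have hmS : m ∈ S := hperm.mem_iff.mpr (List.mem_filter.mp hm').1
        have hmmaj : decide (major ≤ m) = true := (List.mem_filter.mp hm').2
        have h1 : k ≤ m := find?_min_of_pairwise hpw hf m hmS hmmaj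
        have h2 : m ≤ k := PySem.List.min?_isMin hmin k hkc
        have hm : m = k := le_antisymm h2 h1
        simp only [hf, hmin, hm]
    | none =>
      -- no key ≥ major: candidates empty; the last sorted key is the maximum key
      have hcnil : cands = [] := by
        rw [hc, List.filter_eq_nil_iff]
        intro x hx
        have hxS : x ∈ S := hperm.mem_iff.mpr hx
        have := List.find?_eq_none.mp hf x hxS
        simpa using this
      have hminnone : PySem.List.min? cands (fun x => x) = none := by
        rw [PySem.List.min?_eq_none_iff, hcnil]
      simp only [hf, hminnone]
      cases hlast : S.getLast? with
      | none =>
        have hSnil : S = [] := List.getLast?_eq_none_iff.mp hlast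
        have hksnil : ks = [] := by
          have := hperm.length_eq
          simp [hSnil] at this
          exact List.eq_nil_of_length_eq_zero this.symm
        have hmaxnone : PySem.List.max? ks (fun x => x) = none := by
          rw [PySem.List.max?_eq_none_iff, hksnil]
        simp only [hmaxnone]
      | some L =>
        have hLS : L ∈ S := List.mem_of_getLast? hlast
        have hLks : L ∈ ks := hperm.mem_iff.mp hLS
        cases hmax : PySem.List.max? ks (fun x => x) with
        | none =>
          exact absurd ((PySem.List.max?_eq_none_iff ks (fun x => x)).mp hmax ▸ hLks) (List.not_mem_nil)
        | some M =>
          have hMks : M ∈ ks := PySem.List.max?_mem hmax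
          have h1 : L ≤ M := PySem.List.max?_isMax hmax L hLks
          have h2 : M ≤ L := getLast?_max_of_pairwise hpw hlast M (hperm.mem_iff.mpr hMks)
          have hlm : L = M := le_antisymm h1 h2
          simp only [hlast, hlm]

-- ===== VERDICT (by name: the statement is the Claim_ definition above) =====
theorem choose_profile_for_major_py_spec : Claim_equal_choose_profile_for_major_py := by
  intro major mapping _ _
  exact choose_eq major mapping
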